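-- pv_equiv track=rewrite | github.com/ssho90/hobot-service | hobot/service/macro_trading/collectors/kr_corporate_collector.py | summarize_surprise_label
-- ===== SOURCE A (Python) =====
-- from typing import Any, Dict, Iterable, List, Optional, Sequence
--
-- def summarize_surprise_label(surprise_payload: Dict[str, Dict[str, Any]]) -> str:
--     labels = [str((item or {}).get("label") or "unknown") for item in surprise_payload.values()]
--     if any(label == "beat" for label in labels):
--         return "beat"
--     if any(label == "miss" for label in labels):
--         return "miss"
--     if any(label == "meet" for label in labels):
--         return "meet"
--     return "unknown"
-- ===== SOURCE B (Python) =====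
-- def summarize_surprise_label(surprise_payload):
--     # Single pass keeping the best (lowest) priority seen; early exit on "beat".
--     priority = {"beat": 0, "miss": 1, "meet": 2}
--     best = 3
--     for item in surprise_payload.values():
--         label = str((item or {}).get("label") or "unknown")
--         rank = priority.get(label, 3)
--         if rank < best:
--             best = rank
--             if best == 0:
--                 break
--     return ["beat", "miss", "meet", "unknown"][best]
-- ===== Notes on version B (the rewrite author's own statement) =====
-- stated objective: alternative
-- what changed: Replaced the build-a-labels-list-plus-three-any-scans with a single pass that keeps the minimum priority rank (beat<miss<meet<unknown) with early exit on beat.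
import Mathlib
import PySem

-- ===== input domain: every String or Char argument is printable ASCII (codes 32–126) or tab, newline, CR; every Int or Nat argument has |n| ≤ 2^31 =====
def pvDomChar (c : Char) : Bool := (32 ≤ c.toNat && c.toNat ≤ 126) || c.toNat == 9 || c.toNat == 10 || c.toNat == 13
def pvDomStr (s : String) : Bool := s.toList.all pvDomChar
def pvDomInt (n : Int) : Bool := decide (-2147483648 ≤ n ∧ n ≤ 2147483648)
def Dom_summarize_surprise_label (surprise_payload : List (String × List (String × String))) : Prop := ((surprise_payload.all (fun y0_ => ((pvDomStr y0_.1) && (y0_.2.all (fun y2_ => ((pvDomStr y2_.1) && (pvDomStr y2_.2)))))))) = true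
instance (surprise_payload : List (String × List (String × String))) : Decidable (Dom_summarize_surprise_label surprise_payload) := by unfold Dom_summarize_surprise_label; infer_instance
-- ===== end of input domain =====

-- B replaces A's labels-list plus three any-scans by a single minimum-priority pass (alternative decomposition, not claimed faster).


-- str((item or {}).get("label") or "unknown"): None or "" (the falsy strings) become "unknown"; shared by both ports
def pvLabelOf (item : List (String × String)) : String :=
  match (PySem.Dict.mk item).get? "label" with
  | none => "unknown"
  | some s => if s = "" then "unknown" else s

-- ===== PORT A =====
def summarize_surprise_label (surprise_payload : List (String × List (String × String))) : String :=
  let labels := surprise_payload.map (fun kv => pvLabelOf kv.2)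
  if labels.any (· == "beat") then "beat"
  else if labels.any (· == "miss") then "miss"
  else if labels.any (· == "meet") then "meet"
  else "unknown"

-- ===== PORT B =====
def pvPriority : PySem.Dict String Nat := PySem.Dict.mk [("beat", 0), ("miss", 1), ("meet", 2)]

def pvBestLoop (items : List (String × List (String × String))) (best : Nat) : Nat :=
  match items with
  | [] => best
  | kv :: rest =>
    let rank := pvPriority.getD (pvLabelOf kv.2) 3
    if rank < best then (if rank = 0 then 0 else pvBestLoop rest rank)  -- break when best hits 0
    else pvBestLoop rest best

def summarize_surprise_label_alt (surprise_payload : List (String × List (String × String))) : String :=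
  -- ["beat","miss","meet","unknown"][best]; pvBestLoop always yields a rank in {0,1,2,3}
  match pvBestLoop surprise_payload 3 with
  | 0 => "beat"
  | 1 => "miss"
  | 2 => "meet"
  | _ => "unknown"

-- ===== PRECONDITION & SPEC =====
def Spec_summarize_surprise_label (surprise_payload : List (String × List (String × String))) (out : String) : Prop := out = summarize_surprise_label_alt surprise_payload
instance (surprise_payload : List (String × List (String × String))) (out : String) : Decidable (Spec_summarize_surprise_label surprise_payload out) := by unfold Spec_summarize_surprise_label; infer_instance

-- ===== CLAIM (what is proved, stated in full; the proofs are below) =====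
def Claim_equal_summarize_surprise_label : Prop := ∀ (surprise_payload : List (String × List (String × String))), Dom_summarize_surprise_label surprise_payload → Spec_summarize_surprise_label surprise_payload (summarize_surprise_label surprise_payload)

-- ===== LEMMAS AND PROOFS =====

-- the rank each label gets from pvPriority
lemma pvRank_char (s : String) :
    pvPriority.getD s 3 = (if s = "beat" then 0 else if s = "miss" then 1 else if s = "meet" then 2 else 3) := by
  by_cases h1 : s = "beat"
  · subst h1; rfl
  · by_cases h2 : s = "miss"
    · subst h2; rfl
    · by_cases h3 : s = "meet"
      · subst h3; rfl
      · simp [pvPriority, PySem.Dict.getD_eq_get?_getD, PySem.Dict.get?, h1, h2, h3,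
              Ne.symm h1, Ne.symm h2, Ne.symm h3]

-- the minimum rank, foldr-style
def pvMinRank (items : List (String × List (String × String))) : Nat :=
  match items with
  | [] => 3
  | kv :: rest => min (pvPriority.getD (pvLabelOf kv.2) 3) (pvMinRank rest)

lemma pvBestLoop_eq (items : List (String × List (String × String))) :
    ∀ b, b ≤ 3 → pvBestLoop items b = min b (pvMinRank items) := by
  induction items with
  | nil => intro b hb; simp [pvBestLoop, pvMinRank]; omega
  | cons kv rest ih =>
    intro b hb
    simp only [pvBestLoop, pvMinRank]
    have hr : pvPriority.getD (pvLabelOf kv.2) 3 ≤ 3 := by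
      rw [pvRank_char]; split_ifs <;> omega
    split_ifs with h1 h2
    · have : pvMinRank rest ≥ 0 := Nat.zero_le _
      have := ih 0 (by omega)
      omega
    · have := ih (pvPriority.getD (pvLabelOf kv.2) 3) hr
      omega
    · have := ih b hb
      omega

lemma pvMinRank_char (items : List (String × List (String × String))) :
    ((pvMinRank items = 0) ↔ (items.any (fun kv => pvLabelOf kv.2 == "beat")) = true)
    ∧ ((pvMinRank items ≤ 1) ↔ (items.any (fun kv => pvLabelOf kv.2 == "beat") || items.any (fun kv => pvLabelOf kv.2 == "miss")) = true)
    ∧ ((pvMinRank items ≤ 2) ↔ (items.any (fun kv => pvLabelOf kv.2 == "beat") || items.any (fun kv => pvLabelOf kv.2 == "miss") || items.any (fun kv => pvLabelOf kv.2 == "meet")) = true) := by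
  induction items with
  | nil => simp [pvMinRank]
  | cons kv rest ih =>
    obtain ⟨h0, h1, h2⟩ := ih
    simp only [pvMinRank, List.any_cons, Bool.or_eq_true, beq_iff_eq, pvRank_char] at *
    refine ⟨?_, ?_, ?_⟩ <;> split_ifs with ha hb hc <;> simp_all

theorem summarize_surprise_label_spec : Claim_equal_summarize_surprise_label := by
  intro pay _
  unfold Spec_summarize_surprise_label summarize_surprise_label summarize_surprise_label_alt
  obtain ⟨h0, h1, h2⟩ := pvMinRank_char pay
  rw [pvBestLoop_eq pay 3 (by omega)]
  simp only [List.any_map, Function.comp_def]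
  by_cases hb : (pay.any (fun kv => pvLabelOf kv.2 == "beat")) = true
  · have : pvMinRank pay = 0 := h0.mpr hb
    simp [hb, this]
  · by_cases hm : (pay.any (fun kv => pvLabelOf kv.2 == "miss")) = true
    · have e1 : pvMinRank pay ≤ 1 := h1.mpr (by simp [hm])
      have e0 : pvMinRank pay ≠ 0 := fun h => hb (h0.mp h)
      have : pvMinRank pay = 1 := by omega
      simp [hb, hm, this]
    · by_cases he : (pay.any (fun kv => pvLabelOf kv.2 == "meet")) = true
      · have e2 : pvMinRank pay ≤ 2 := h2.mpr (by simp [he])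
        have e0 : pvMinRank pay ≠ 0 := fun h => hb (h0.mp h)
        have e1 : ¬ pvMinRank pay ≤ 1 := by
          intro h
          have := h1.mp h
          simp [hb, hm] at this
        have : pvMinRank pay = 2 := by omega
        simp [hb, hm, he, this]
      · have e2 : ¬ pvMinRank pay ≤ 2 := fun h => by
          have := h2.mp h; simp [hb, hm, he] at this
        have : min 3 (pvMinRank pay) = 3 := by omega
        simp [hb, hm, he, this]
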